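-- pv_equiv track=rewrite | github.com/DiyorbekBoltayev/leetcode | python/custom/sanoq-sistemalari.py | onlikdan_onoltikka
-- ===== SOURCE A (Python) =====
-- def onlikdan_onoltikka(a):
--     b = []
--     while True:
--         if a == 0:
--             break
--         else:
--             b.append(a % 16)
--             a = a // 16
--     b.reverse()
--     return b
-- ===== SOURCE B (Python) =====
-- def onlikdan_onoltikka(a):
--     if a == 0:
--         return []
--     p = 1
--     while p * 16 <= a:
--         p *= 16
--     out = []
--     while p > 0:
--         out.append(a // p)
--         a %= p
--         p //= 16
--     return out
-- ===== Notes on version B (the rewrite author's own statement) =====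
-- stated objective: alternative
-- what changed: Replaces A's LSB-first while-loop (collect a % 16 digits, then reverse) by a two-phase MSB-first algorithm: first find the largest power of 16 not exceeding a, then peel digits from the most significant end with a //= p; a %= p; p //= 16 loop, so no reverse is needed.
import Mathlib
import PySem

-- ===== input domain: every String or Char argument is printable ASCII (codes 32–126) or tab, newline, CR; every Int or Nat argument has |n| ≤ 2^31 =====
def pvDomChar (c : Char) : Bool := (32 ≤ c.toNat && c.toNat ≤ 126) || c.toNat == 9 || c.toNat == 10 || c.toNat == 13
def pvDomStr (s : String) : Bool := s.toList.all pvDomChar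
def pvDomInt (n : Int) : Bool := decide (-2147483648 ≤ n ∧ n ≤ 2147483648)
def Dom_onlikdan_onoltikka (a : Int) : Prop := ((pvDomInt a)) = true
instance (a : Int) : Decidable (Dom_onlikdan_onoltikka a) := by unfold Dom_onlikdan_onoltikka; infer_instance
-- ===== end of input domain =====

-- B replaces A's LSB-first loop + final reverse by a two-phase MSB-first algorithm:
-- find the largest power of 16 not exceeding a, then peel digits from the most
-- significant end (objective: alternative).

-- ===== PORT A =====
-- A's while-loop: append a % 16, set a = a // 16, until a == 0; the 'a < 0' guard only
-- makes the Lean function total — Python A never returns there (infinite loop).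
def onlikdan_onoltikka_loop (a : Int) (b : List Int) : List Int :=
  if a = 0 then b
  else if a < 0 then b
  else onlikdan_onoltikka_loop (PySem.Int.floordiv a 16) (b ++ [PySem.Int.mod a 16])
termination_by a.toNat
decreasing_by
  rw [PySem.Int.floordiv_eq_ediv_of_pos (show (0:Int) < 16 by norm_num)]
  omega

def onlikdan_onoltikka (a : Int) : List Int :=
  (onlikdan_onoltikka_loop a []).reverse

-- ===== PORT B =====
-- B's first loop: while p * 16 <= a: p *= 16.  The '1 ≤ p' guard only makes the Lean
-- function total — B only ever calls it with p = 1 (and Python B would not return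
-- from this loop with p ≤ 0 either).
def onlikdan_onoltikka_pow (a p : Int) : Int :=
  if 1 ≤ p ∧ p * 16 ≤ a then onlikdan_onoltikka_pow a (p * 16) else p
termination_by (a - p).toNat
decreasing_by omega

-- B's second loop: while p > 0: out.append(a // p); a %= p; p //= 16.
def onlikdan_onoltikka_emit (a p : Int) (out : List Int) : List Int :=
  if 0 < p then
    onlikdan_onoltikka_emit (PySem.Int.mod a p) (PySem.Int.floordiv p 16)
      (out ++ [PySem.Int.floordiv a p])
  else out
termination_by p.toNat
decreasing_by
  rw [PySem.Int.floordiv_eq_ediv_of_pos (show (0:Int) < 16 by norm_num)]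
  omega

def onlikdan_onoltikka_alt (a : Int) : List Int :=
  if a = 0 then []
  else onlikdan_onoltikka_emit a (onlikdan_onoltikka_pow a 1) []

-- ===== PRECONDITION & SPEC =====
-- Pre_ excludes a < 0, where Python A never returns (its while-loop runs forever).
def Pre_onlikdan_onoltikka (a : Int) : Prop := 0 ≤ a
instance (a : Int) : Decidable (Pre_onlikdan_onoltikka a) := by unfold Pre_onlikdan_onoltikka; infer_instance
def pvWitness_onlikdan_onoltikka : Int := (255)

def Spec_onlikdan_onoltikka (a : Int) (out : List Int) : Prop := out = onlikdan_onoltikka_alt a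
instance (a : Int) (out : List Int) : Decidable (Spec_onlikdan_onoltikka a out) := by unfold Spec_onlikdan_onoltikka; infer_instance

-- ===== CLAIM (what is proved, stated in full; the proofs are below) =====
def Claim_equal_onlikdan_onoltikka : Prop := ∀ (a : Int), Dom_onlikdan_onoltikka a → Pre_onlikdan_onoltikka a → Spec_onlikdan_onoltikka a (onlikdan_onoltikka a)

-- ===== LEMMAS AND PROOFS =====

-- Ghost reference function: MSB-first hex digits by recursion on the quotient.
def pvRec (a : Int) : List Int :=
  if _h : 0 < a then pvRec (a / 16) ++ [a % 16] else []
termination_by a.toNat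
decreasing_by omega

lemma pvRec_pos {a : Int} (h : 0 < a) : pvRec a = pvRec (a / 16) ++ [a % 16] := by
  rw [pvRec]; simp [h]

lemma pvRec_nonpos {a : Int} (h : ¬ 0 < a) : pvRec a = [] := by
  rw [pvRec]; simp [h]

-- ---- A-side: the loop with accumulator, reversed, equals pvRec ----
lemma loop_acc (a : Int) (b : List Int) :
    onlikdan_onoltikka_loop a b = b ++ onlikdan_onoltikka_loop a [] := by
  induction hn : a.toNat using Nat.strong_induction_on generalizing a b with
  | _ n ih =>
    by_cases h0 : a = 0
    · simp [onlikdan_onoltikka_loop, h0]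
    · by_cases hneg : a < 0
      · simp [onlikdan_onoltikka_loop, h0, hneg]
      · conv_lhs => rw [onlikdan_onoltikka_loop]
        conv_rhs => rw [onlikdan_onoltikka_loop]
        simp only [h0, hneg, if_false, List.nil_append]
        have hlt : (PySem.Int.floordiv a 16).toNat < n := by
          rw [PySem.Int.floordiv_eq_ediv_of_pos (show (0:Int) < 16 by norm_num)]
          omega
        rw [ih _ hlt _ _ rfl, ih _ hlt _ [PySem.Int.mod a 16] rfl]
        simp

lemma loop_reverse_eq_rec (a : Int) :
    (onlikdan_onoltikka_loop a []).reverse = pvRec a := by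
  induction hn : a.toNat using Nat.strong_induction_on generalizing a with
  | _ n ih =>
    by_cases h0 : a = 0
    · simp [onlikdan_onoltikka_loop, pvRec_nonpos, h0]
    · by_cases hneg : a < 0
      · rw [pvRec_nonpos (by omega)]
        simp [onlikdan_onoltikka_loop, h0, hneg]
      · conv_lhs => rw [onlikdan_onoltikka_loop]
        rw [pvRec_pos (by omega)]
        simp only [h0, hneg, if_false, List.nil_append]
        have hlt : (PySem.Int.floordiv a 16).toNat < n := by
          rw [PySem.Int.floordiv_eq_ediv_of_pos (show (0:Int) < 16 by norm_num)]
          omega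
        rw [loop_acc, List.reverse_append, ih _ hlt _ rfl,
            PySem.Int.floordiv_eq_ediv_of_pos (show (0:Int) < 16 by norm_num),
            PySem.Int.mod_eq_emod_of_pos (show (0:Int) < 16 by norm_num)]
        simp

-- ---- B-side ----
-- accumulator-free form of the emit loop
def pvEmit (a p : Int) : List Int :=
  if 0 < p then (a / p) :: pvEmit (a % p) (p / 16) else []
termination_by p.toNat
decreasing_by omega

lemma pvEmit_one (a : Int) : pvEmit a 1 = [a] := by
  rw [pvEmit, pvEmit]; norm_num

lemma emit_eq_pvEmit (a p : Int) (out : List Int) :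
    onlikdan_onoltikka_emit a p out = out ++ pvEmit a p := by
  induction hn : p.toNat using Nat.strong_induction_on generalizing a p out with
  | _ n ih =>
    by_cases hp : 0 < p
    · rw [onlikdan_onoltikka_emit]; rw [pvEmit]
      simp only [hp, if_true]
      have h16 : (0:Int) < 16 := by norm_num
      rw [PySem.Int.floordiv_eq_ediv_of_pos h16,
          PySem.Int.mod_eq_emod_of_pos hp, PySem.Int.floordiv_eq_ediv_of_pos hp]
      rw [ih (p / 16).toNat (by omega) _ _ _ rfl]
      simp
    · rw [onlikdan_onoltikka_emit]; rw [pvEmit]; simp [hp]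

-- arithmetic helper: a % (16*n) / 16 = a / 16 % n for n > 0
lemma pv_emod_mul_ediv (a n : Int) (hn : 0 < n) : a % (16 * n) / 16 = a / 16 % n := by
  have h16n : (0:Int) < 16 * n := by positivity
  have hr0 : 0 ≤ a % (16 * n) := Int.emod_nonneg a (by omega)
  have hrlt : a % (16 * n) < 16 * n := Int.emod_lt_of_pos a h16n
  have ha : a = 16 * n * (a / (16 * n)) + a % (16 * n) := (Int.mul_ediv_add_emod a (16 * n)).symm
  set q := a / (16 * n) with hq
  set r := a % (16 * n) with hr
  have hdiv : a / 16 = r / 16 + n * q := by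
    conv_lhs => rw [ha]
    rw [show 16 * n * q + r = r + (n * q) * 16 by ring]
    rw [Int.add_mul_ediv_right _ _ (by norm_num : (16:Int) ≠ 0)]
  rw [hdiv, Int.add_mul_emod_self_left]
  have hq16 : r / 16 < n := by
    rw [Int.ediv_lt_iff_lt_mul (by norm_num : (0:Int) < 16)]
    omega
  exact (Int.emod_eq_of_lt (Int.ediv_nonneg hr0 (by norm_num)) hq16).symm

-- key bridge: one ride down the power ladder equals splitting off the LAST digit
lemma pvEmit_bridge (k : ℕ) (a : Int) :
    pvEmit a (16 ^ (k + 1)) = pvEmit (a / 16) (16 ^ k) ++ [a % 16] := by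
  induction k generalizing a with
  | zero =>
    rw [pvEmit]
    norm_num [pvEmit_one]
  | succ k ih =>
    have h1 : (0:Int) < 16 ^ (k + 1 + 1) := by positivity
    have h2 : (0:Int) < 16 ^ (k + 1) := by positivity
    rw [pvEmit]; conv_rhs => rw [pvEmit]
    simp only [h1, h2, if_true]
    have e1 : (16:Int) ^ (k + 1 + 1) / 16 = 16 ^ (k + 1) := by
      rw [pow_succ]; exact Int.mul_ediv_cancel _ (by norm_num)
    have e2 : (16:Int) ^ (k + 1) / 16 = 16 ^ k := by
      rw [pow_succ]; exact Int.mul_ediv_cancel _ (by norm_num)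
    rw [e1, e2]
    have hd : a / 16 ^ (k + 1 + 1) = a / 16 / 16 ^ (k + 1) := by
      rw [Int.ediv_ediv_of_nonneg (by norm_num : (0:Int) ≤ 16)]
      rw [← pow_succ']
    have hm : a % 16 ^ (k + 1 + 1) / 16 = a / 16 % 16 ^ (k + 1) := by
      rw [show (16:Int) ^ (k + 1 + 1) = 16 * 16 ^ (k + 1) from (pow_succ' 16 (k+1))]
      exact pv_emod_mul_ediv a _ h2
    have hmm : a % 16 ^ (k + 1 + 1) % 16 = a % 16 :=
      Int.emod_emod_of_dvd a (dvd_pow_self 16 (by omega : k + 1 + 1 ≠ 0))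
    rw [hd, ih (a % 16 ^ (k + 1 + 1)), hm, hmm]
    simp

-- main B lemma: started at the largest power of 16 below a, pvEmit computes pvRec
lemma pvEmit_eq_pvRec (k : ℕ) (a : Int) (hlo : 16 ^ k ≤ a) (hhi : a < 16 ^ (k + 1)) :
    pvEmit a (16 ^ k) = pvRec a := by
  induction k generalizing a with
  | zero =>
    rw [pow_zero] at hlo
    rw [zero_add, pow_one] at hhi
    rw [pow_zero, pvEmit_one, pvRec_pos (by omega)]
    rw [Int.ediv_eq_zero_of_lt (by omega) (by omega), pvRec_nonpos (by omega)]
    rw [Int.emod_eq_of_lt (by omega) (by omega)]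
    simp
  | succ k ih =>
    rw [pvEmit_bridge]
    have hlo' : (16:Int) ^ k ≤ a / 16 := by
      rw [Int.le_ediv_iff_mul_le (by norm_num : (0:Int) < 16)]
      calc (16:Int) ^ k * 16 = 16 ^ (k + 1) := (pow_succ 16 k).symm
        _ ≤ a := hlo
    have hhi' : a / 16 < 16 ^ (k + 1) := by
      rw [Int.ediv_lt_iff_lt_mul (by norm_num : (0:Int) < 16)]
      calc a < 16 ^ (k + 1 + 1) := hhi
        _ = 16 ^ (k + 1) * 16 := pow_succ 16 (k + 1)
    have hpos : 0 < a := lt_of_lt_of_le (by positivity) hlo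
    rw [ih _ hlo' hhi', pvRec_pos hpos]

-- the power loop finds the largest power of 16 that is ≤ a
lemma pow_spec (a : Int) (k : ℕ) (hle : 16 ^ k ≤ a) :
    ∃ m : ℕ, onlikdan_onoltikka_pow a (16 ^ k) = 16 ^ m ∧ 16 ^ m ≤ a ∧ a < 16 ^ (m + 1) := by
  have hpk : (0:Int) < 16 ^ k := by positivity
  induction hn : (a - 16 ^ k).toNat using Nat.strong_induction_on generalizing k with
  | _ n ih =>
    rw [onlikdan_onoltikka_pow]
    by_cases h : 16 ^ k * 16 ≤ a
    · rw [if_pos ⟨by omega, h⟩]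
      have hs : (16:Int) ^ k * 16 = 16 ^ (k + 1) := (pow_succ 16 k).symm
      have hpk1 : (0:Int) < 16 ^ (k + 1) := by positivity
      have hlt : (a - 16 ^ (k + 1)).toNat < n := by
        have : (16:Int) ^ k < 16 ^ (k + 1) := by rw [pow_succ]; nlinarith
        omega
      rw [hs]
      exact ih _ hlt (k + 1) (hs ▸ h) hpk1 rfl
    · rw [if_neg (by
        intro hc
        exact h hc.2)]
      exact ⟨k, rfl, hle, by rw [pow_succ]; omega⟩

-- ===== VERDICT (by name: the statement is the Claim_ definition above) =====
theorem onlikdan_onoltikka_spec : Claim_equal_onlikdan_onoltikka := by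
  intro a _ hpre
  unfold Spec_onlikdan_onoltikka onlikdan_onoltikka onlikdan_onoltikka_alt
  by_cases h0 : a = 0
  · subst h0
    rw [onlikdan_onoltikka_loop]
    simp
  · simp only [h0, if_false]
    have h1 : (16:Int) ^ 0 ≤ a := by
      rw [pow_zero]
      unfold Pre_onlikdan_onoltikka at hpre
      omega
    obtain ⟨m, hm, hlo, hhi⟩ := pow_spec a 0 h1
    rw [pow_zero] at hm
    rw [hm, emit_eq_pvEmit, List.nil_append, pvEmit_eq_pvRec m a hlo hhi,
        loop_reverse_eq_rec]
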